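-- pv_equiv track=rewrite | github.com/HFouch/genolve | class_CorrectForInsertionsAndDeletions.py | find_inserted_blocks
-- ===== SOURCE A (Python) =====
-- def find_inserted_blocks(sequence_blocks_A, sequence_blocks_B):
--
--     inserted_sequence_blocks = []
--
--     for i in range(len(sequence_blocks_B)):
--         if abs(sequence_blocks_B[i]) not in sequence_blocks_A:
--             inserted_sequence_blocks.append(sequence_blocks_B[i])
--             pass
--         else:
--             pass
--
--     for i in range(len(inserted_sequence_blocks)):
--         sequence_blocks_B.remove(inserted_sequence_blocks[i])
--
--     return sequence_blocks_B, inserted_sequence_blocks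
-- ===== SOURCE B (Python) =====
-- def find_inserted_blocks(sequence_blocks_A, sequence_blocks_B):
--     present = set(sequence_blocks_A)
--     kept, inserted = [], []
--     for x in sequence_blocks_B:
--         (kept if abs(x) in present else inserted).append(x)
--     sequence_blocks_B[:] = kept
--     return sequence_blocks_B, inserted
-- ===== Notes on version B (the rewrite author's own statement) =====
-- stated objective: faster
-- what changed: One pass partitioning B into kept/inserted against a hash set of A's values, with an in-place slice assignment; replaces A's list-membership scans plus a second loop of list.remove scans.
import Mathlib
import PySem

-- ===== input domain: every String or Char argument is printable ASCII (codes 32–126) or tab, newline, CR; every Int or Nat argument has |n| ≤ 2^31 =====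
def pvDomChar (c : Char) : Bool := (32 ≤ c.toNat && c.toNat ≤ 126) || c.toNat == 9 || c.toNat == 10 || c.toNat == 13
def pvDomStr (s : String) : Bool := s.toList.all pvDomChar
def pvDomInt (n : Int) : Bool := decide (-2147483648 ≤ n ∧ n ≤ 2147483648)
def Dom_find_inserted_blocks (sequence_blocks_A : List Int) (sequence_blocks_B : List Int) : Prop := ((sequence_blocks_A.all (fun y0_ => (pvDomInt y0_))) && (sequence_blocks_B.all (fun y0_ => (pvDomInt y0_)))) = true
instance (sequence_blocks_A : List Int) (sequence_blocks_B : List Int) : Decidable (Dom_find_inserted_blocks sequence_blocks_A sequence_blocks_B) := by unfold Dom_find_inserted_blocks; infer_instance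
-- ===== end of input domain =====

-- B replaces A's list-membership scans plus a second loop of list.remove scans by a
-- single ordered partition of B against a set of A's values, with an in-place slice
-- assignment (same return value; both Pythons mutate sequence_blocks_B to the same
-- final list).

-- ===== PORT A =====
def find_inserted_blocks (sequence_blocks_A : List Int) (sequence_blocks_B : List Int) : List Int × List Int :=
  -- for i in range(len(B)): if abs(B[i]) not in A: inserted.append(B[i])
  let inserted :=
    (PySem.List.pyRange 0 (PySem.List.len sequence_blocks_B) 1).foldl
      (fun acc i =>
        let x := PySem.List.pyGetD sequence_blocks_B i 0
        if |x| ∉ sequence_blocks_A then acc ++ [x] else acc) []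
  -- for i in range(len(inserted)): B.remove(inserted[i])
  -- (list.remove raises ValueError when absent; unreachable here, so the port
  --  defaults to the unchanged list in that impossible branch)
  let b :=
    (PySem.List.pyRange 0 (PySem.List.len inserted) 1).foldl
      (fun b i =>
        let v := PySem.List.pyGetD inserted i 0
        (PySem.List.remove? b v).getD b) sequence_blocks_B
  (b, inserted)

-- ===== PORT B =====
-- structural recursion = B's single pass appending to kept/inserted
def fib_partition (present : PySem.Set Int) : List Int → List Int × List Int
  | [] => ([], [])
  | x :: xs =>
    let r := fib_partition present xs
    if |x| ∈ present then (x :: r.1, r.2) else (r.1, x :: r.2)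

def find_inserted_blocks_alt (sequence_blocks_A : List Int) (sequence_blocks_B : List Int) : List Int × List Int :=
  fib_partition (PySem.Set.ofList sequence_blocks_A) sequence_blocks_B

-- ===== PRECONDITION & SPEC =====
def Spec_find_inserted_blocks (sequence_blocks_A : List Int) (sequence_blocks_B : List Int) (out : List Int × List Int) : Prop := out = find_inserted_blocks_alt sequence_blocks_A sequence_blocks_B
instance (sequence_blocks_A : List Int) (sequence_blocks_B : List Int) (out : List Int × List Int) : Decidable (Spec_find_inserted_blocks sequence_blocks_A sequence_blocks_B out) := by unfold Spec_find_inserted_blocks; infer_instance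

-- ===== CLAIM (what is proved, stated in full; the proofs are below) =====
def Claim_equal_find_inserted_blocks : Prop := ∀ (sequence_blocks_A : List Int) (sequence_blocks_B : List Int), Dom_find_inserted_blocks sequence_blocks_A sequence_blocks_B → Spec_find_inserted_blocks sequence_blocks_A sequence_blocks_B (find_inserted_blocks sequence_blocks_A sequence_blocks_B)

-- ===== LEMMAS AND PROOFS =====

-- B's partition is (filter kept, filter inserted)
theorem fib_partition_eq (A : List Int) (B : List Int) :
    fib_partition (PySem.Set.ofList A) B =
      (B.filter (fun x => decide (|x| ∈ A)), B.filter (fun x => !decide (|x| ∈ A))) := by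
  induction B with
  | nil => rfl
  | cons x xs ih =>
    simp only [fib_partition, ih, List.filter_cons]
    by_cases h : |x| ∈ A <;> simp [h, PySem.Set.mem_ofList]

-- removing a list of elements all ≠ b0 leaves the head b0 in place
theorem foldl_remove_cons (l : List Int) (b0 : Int) (bs : List Int)
    (h : ∀ x ∈ l, x ≠ b0) :
    l.foldl (fun b v => (PySem.List.remove? b v).getD b) (b0 :: bs) =
      b0 :: l.foldl (fun b v => (PySem.List.remove? b v).getD b) bs := by
  induction l generalizing bs with
  | nil => rfl
  | cons x l ih =>
    have hx : x ≠ b0 := h x (by simp)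
    simp only [List.foldl_cons]
    rw [PySem.List.remove?_cons_of_ne bs (Ne.symm hx)]
    cases PySem.List.remove? bs x with
    | none => simp [ih _ (fun y hy => h y (by simp [hy]))]
    | some r => simp [ih _ (fun y hy => h y (by simp [hy]))]

-- removing, in order, exactly the non-kept elements of B from B yields the kept ones
theorem foldl_remove_filter (A : List Int) (B : List Int) :
    (B.filter (fun x => !decide (|x| ∈ A))).foldl
        (fun b v => (PySem.List.remove? b v).getD b) B =
      B.filter (fun x => decide (|x| ∈ A)) := by
  induction B with
  | nil => rfl
  | cons b B' ih =>
    by_cases hb : |b| ∈ A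
    · rw [List.filter_cons_of_neg (by simp [hb]), List.filter_cons_of_pos (by simp [hb])]
      rw [foldl_remove_cons _ _ _ (fun x hx => by
        simp only [List.mem_filter, Bool.not_eq_eq_eq_not, Bool.not_true,
          decide_eq_false_iff_not] at hx
        intro e; exact hx.2 (e ▸ hb))]
      rw [ih]
    · rw [List.filter_cons_of_pos (by simp [hb]), List.filter_cons_of_neg (by simp [hb])]
      simp only [List.foldl_cons, PySem.List.remove?_cons_self, Option.getD_some]
      exact ih

-- ===== VERDICT (by name: the statement is the Claim_ definition above) =====
theorem first_fold_eq (A B : List Int) :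
    (PySem.List.pyRange 0 (PySem.List.len B) 1).foldl
      (fun acc i =>
        let x := PySem.List.pyGetD B i 0
        if |x| ∉ A then acc ++ [x] else acc) ([] : List Int) =
      B.filter (fun x => !decide (|x| ∈ A)) := by
  rw [show PySem.List.len B = ((B.length : Int)) from rfl]
  rw [PySem.List.foldl_pyRange_zero_pyGetD' B 0
    (fun acc x => if |x| ∉ A then acc ++ [x] else acc) []]
  rw [PySem.List.foldl_append_ite_eq_filter]
  simp

theorem second_fold_eq (A B : List Int) :
    (PySem.List.pyRange 0 (PySem.List.len (B.filter (fun x => !decide (|x| ∈ A)))) 1).foldl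
      (fun b i =>
        let v := PySem.List.pyGetD (B.filter (fun x => !decide (|x| ∈ A))) i 0
        (PySem.List.remove? b v).getD b) B =
      B.filter (fun x => decide (|x| ∈ A)) := by
  rw [show PySem.List.len (B.filter (fun x => !decide (|x| ∈ A))) =
      (((B.filter (fun x => !decide (|x| ∈ A))).length : Int)) from rfl]
  rw [PySem.List.foldl_pyRange_zero_pyGetD' _ 0
    (fun b v => (PySem.List.remove? b v).getD b) B]
  exact foldl_remove_filter A B

-- ===== VERDICT (by name: the statement is the Claim_ definition above) =====
theorem find_inserted_blocks_spec : Claim_equal_find_inserted_blocks := by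
  intro A B _
  show find_inserted_blocks A B = find_inserted_blocks_alt A B
  unfold find_inserted_blocks find_inserted_blocks_alt
  rw [fib_partition_eq, first_fold_eq]
  exact Prod.ext (second_fold_eq A B) rfl
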